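-- pv_equiv track=rewrite | github.com/wguDataNinja/wgu-atlas | scripts/program_guides/extract_prereq_relationships.py | fuzzy_title_match
-- ===== SOURCE A (Python) =====
-- def levenshtein(s1: str, s2: str) -> int:
--     """Compute Levenshtein edit distance between two strings."""
--     if len(s1) < len(s2):
--         return levenshtein(s2, s1)
--     if len(s2) == 0:
--         return len(s1)
--     prev_row = range(len(s2) + 1)
--     for i, c1 in enumerate(s1):
--         curr_row = [i + 1]
--         for j, c2 in enumerate(s2):
--             insertions = prev_row[j + 1] + 1
--             deletions = curr_row[j] + 1
--             substitutions = prev_row[j] + (c1 != c2)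
--             curr_row.append(min(insertions, deletions, substitutions))
--         prev_row = curr_row
--     return prev_row[-1]
--
-- def fuzzy_title_match(title: str, title_to_code: dict, max_dist: int = 3) -> tuple[str | None, str | None]:
--     """
--     Try to match `title` against catalog titles.
--     Returns (matched_title, code) or (None, None).
--     """
--     tl = title.strip().lower()
--
--     # Exact match first
--     if tl in title_to_code:
--         code = title_to_code[tl]
--         return title, code
--
--     # Fuzzy match
--     best_dist = max_dist + 1
--     best_code = None
--     best_title = None
--     for catalog_title, code in title_to_code.items():
--         dist = levenshtein(tl, catalog_title)
--         if dist <= max_dist and dist < best_dist: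
--             best_dist = dist
--             best_code = code
--             best_title = catalog_title
--     if best_title:
--         return best_title, best_code
--     return None, None
-- ===== SOURCE B (Python) =====
-- def _dist_within(s1: str, s2: str, cap: int):
--     """Levenshtein distance of s1, s2 if it is <= cap, else None.
--     Keeps a single row (over the shorter string) and aborts a candidate as
--     soon as every entry of the current row exceeds cap (row minima never
--     decrease), so hopeless candidates cost only a few rows."""
--     if len(s1) < len(s2):
--         s1, s2 = s2, s1
--     row = list(range(len(s2) + 1))
--     for i, c1 in enumerate(s1):
--         prev_diag = row[0]
--         row[0] = i + 1
--         best = i + 1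
--         for j, c2 in enumerate(s2):
--             cur = min(row[j + 1] + 1, row[j] + 1, prev_diag + (c1 != c2))
--             prev_diag = row[j + 1]
--             row[j + 1] = cur
--             if cur < best:
--                 best = cur
--         if best > cap:
--             return None
--     d = row[-1]
--     return d if d <= cap else None
--
-- def fuzzy_title_match(title: str, title_to_code: dict, max_dist: int = 3):
--     tl = title.strip().lower()
--
--     code = title_to_code.get(tl)
--     if code is not None:
--         return title, code
--
--     # Fuzzy match with a shrinking distance budget: a candidate is kept only
--     # if its distance is within the current cap, which then tightens to d - 1.
--     best_title = None
--     best_code = None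
--     cap = max_dist
--     for catalog_title, c in title_to_code.items():
--         d = _dist_within(tl, catalog_title, cap)
--         if d is not None:
--             best_title, best_code, cap = catalog_title, c, d - 1
--     if best_title:
--         return best_title, best_code
--     return None, None
-- ===== Notes on version B (the rewrite author's own statement) =====
-- stated objective: faster
-- what changed: B replaces A's full O(n*m) Levenshtein DP per catalog entry by a capped single-row distance that aborts a candidate as soon as the whole DP row exceeds the current budget (row minima never decrease), with the budget shrinking to best-1 as better matches are found.
import Mathlib
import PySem

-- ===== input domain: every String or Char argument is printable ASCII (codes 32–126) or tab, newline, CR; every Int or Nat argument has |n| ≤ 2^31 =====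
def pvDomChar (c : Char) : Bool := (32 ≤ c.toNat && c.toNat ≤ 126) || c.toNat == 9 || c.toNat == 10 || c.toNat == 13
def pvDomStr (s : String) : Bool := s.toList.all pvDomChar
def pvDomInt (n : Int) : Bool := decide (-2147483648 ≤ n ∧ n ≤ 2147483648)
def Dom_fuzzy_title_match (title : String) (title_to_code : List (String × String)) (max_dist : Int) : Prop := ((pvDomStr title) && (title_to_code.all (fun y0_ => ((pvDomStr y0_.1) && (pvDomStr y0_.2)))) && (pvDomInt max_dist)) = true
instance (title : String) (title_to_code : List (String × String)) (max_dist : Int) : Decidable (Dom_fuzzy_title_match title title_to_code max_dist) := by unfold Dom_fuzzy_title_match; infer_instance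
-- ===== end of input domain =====

-- B replaces A's full Levenshtein scan of every catalog entry by a capped distance
-- with early row abort and a shrinking budget (objective: faster; return value only).

-- ===== PORT A =====

-- inner loop 'for j, c2 in enumerate(s2)': builds curr_row by appending
def levAInner (c1 : Char) : List Char → Nat → List Int → List Int → List Int
  | [], _, _, curr_row => curr_row
  | c2 :: rest, j, prev_row, curr_row =>
      let insertions := PySem.List.pyGetD prev_row ((j : Int) + 1) 0 + 1
      let deletions := PySem.List.pyGetD curr_row (j : Int) 0 + 1
      let substitutions := PySem.List.pyGetD prev_row (j : Int) 0 + (if c1 ≠ c2 then 1 else 0)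
      levAInner c1 rest (j + 1) prev_row (curr_row ++ [min (min insertions deletions) substitutions])

-- outer loop 'for i, c1 in enumerate(s1)'
def levAOuter (s2 : List Char) : List Char → Nat → List Int → List Int
  | [], _, prev_row => prev_row
  | c1 :: rest, i, prev_row => levAOuter s2 rest (i + 1) (levAInner c1 s2 0 prev_row [(i : Int) + 1])

def levA (s1 s2 : List Char) : Int :=
  if s1.length < s2.length then levA s2 s1
  else if s2.length = 0 then (s1.length : Int)
  else PySem.List.pyGetD (levAOuter s2 s1 0 (PySem.List.pyRange 0 ((s2.length : Int) + 1) 1)) (-1) 0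
termination_by s2.length

def fuzzy_title_match (title : String) (title_to_code : List (String × String)) (max_dist : Int) : Option String × Option String :=
  let tl := PySem.Str.lower (PySem.Str.strip title)
  let d := PySem.Dict.ofList title_to_code
  if d.contains tl then (some title, d.get? tl)
  else
    let st := d.items.foldl (fun st p =>
        let dist := levA tl.toList p.1.toList
        if dist ≤ max_dist ∧ dist < st.1 then (dist, (some p.2 : Option String), (some p.1 : Option String)) else st)
      ((max_dist + 1 : Int), (none : Option String), (none : Option String))
    match st.2.2 with
    | some bt => if bt ≠ "" then (some bt, st.2.1) else (none, none)
    | none => (none, none)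

-- ===== PORT B =====

-- inner loop of _dist_within: single row updated in place, diagonal carried, running row minimum
def altRowGo (c1 : Char) : List Char → Int → Int → List Int → Int → List Int × Int
  | [], _, _, _, best => ([], best)
  | c2 :: rest, prev_diag, left, row, best =>
      match row with
      | [] => ([], best)  -- unreachable: row always has one entry per remaining char
      | up :: rowRest =>
          let cur := min (min (up + 1) (left + 1)) (prev_diag + (if c1 ≠ c2 then 1 else 0))
          let best' := if cur < best then cur else best
          let r := altRowGo c1 rest up cur rowRest best'
          (cur :: r.1, r.2)

-- outer loop of _dist_within: abort when the whole row exceeds cap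
def altLoop (s2 : List Char) : List Char → Nat → List Int → Int → Option (List Int)
  | [], _, row, _ => some row
  | c1 :: rest, i, row, cap =>
      match row with
      | [] => none  -- unreachable: row is never empty
      | r0 :: rtail =>
          let r := altRowGo c1 s2 r0 ((i : Int) + 1) rtail ((i : Int) + 1)
          if r.2 > cap then none
          else altLoop s2 rest (i + 1) (((i : Int) + 1) :: r.1) cap

def distWithin (s1 s2 : List Char) (cap : Int) : Option Int :=
  let ab := if s1.length < s2.length then (s2, s1) else (s1, s2)
  match altLoop ab.2 ab.1 0 (PySem.List.pyRange 0 ((ab.2.length : Int) + 1) 1) cap with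
  | none => none
  | some row =>
      let d := PySem.List.pyGetD row (-1) 0
      if d ≤ cap then some d else none

def fuzzy_title_match_alt (title : String) (title_to_code : List (String × String)) (max_dist : Int) : Option String × Option String :=
  let tl := PySem.Str.lower (PySem.Str.strip title)
  let d := PySem.Dict.ofList title_to_code
  match d.get? tl with
  | some code => (some title, some code)
  | none =>
    let st := d.items.foldl (fun st p =>
        match distWithin tl.toList p.1.toList st.2.2 with
        | some dd => ((some p.1 : Option String), (some p.2 : Option String), dd - 1)
        | none => st)
      ((none : Option String), (none : Option String), max_dist)
    match st.1 with
    | some bt => if bt ≠ "" then (some bt, st.2.1) else (none, none)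
    | none => (none, none)

-- ===== PRECONDITION & SPEC =====
def Spec_fuzzy_title_match (title : String) (title_to_code : List (String × String)) (max_dist : Int) (out : Option String × Option String) : Prop := out = fuzzy_title_match_alt title title_to_code max_dist
instance (title : String) (title_to_code : List (String × String)) (max_dist : Int) (out : Option String × Option String) : Decidable (Spec_fuzzy_title_match title title_to_code max_dist out) := by unfold Spec_fuzzy_title_match; infer_instance

-- ===== CLAIM (what is proved, stated in full; the proofs are below) =====
def Claim_equal_fuzzy_title_match : Prop := ∀ (title : String) (title_to_code : List (String × String)) (max_dist : Int), Dom_fuzzy_title_match title title_to_code max_dist → Spec_fuzzy_title_match title title_to_code max_dist (fuzzy_title_match title title_to_code max_dist)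

-- ===== LEMMAS AND PROOFS =====

-- Levenshtein distance on REVERSED prefixes: Lv rp rq is the edit distance of
-- the strings whose reversals are rp and rq; heads are the last characters, so
-- the DP recurrence of both ports is exactly this definition.
def Lv : List Char → List Char → Int
  | [], ys => (ys.length : Int)
  | x :: xs, [] => ((x :: xs).length : Int)
  | x :: xs, y :: ys =>
      min (min (Lv xs (y :: ys) + 1) (Lv (x :: xs) ys + 1)) (Lv xs ys + (if x ≠ y then 1 else 0))
termination_by xs ys => xs.length + ys.length

-- the DP row for processed (reversed) prefix rp, already-consumed (reversed) b-prefix rq, remaining chars bs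
def rowL (rp : List Char) : List Char → List Char → List Int
  | rq, [] => [Lv rp rq]
  | rq, c :: rest => Lv rp rq :: rowL rp (c :: rq) rest

def tailRow (rp : List Char) : List Char → List Char → List Int
  | _, [] => []
  | rq, c :: rest => Lv rp (c :: rq) :: tailRow rp (c :: rq) rest

def bmin (x : Int) (l : List Int) : Int := l.foldl (fun b v => if v < b then v else b) x

theorem Lv_nil_right (rp : List Char) : Lv rp [] = (rp.length : Int) := by
  cases rp <;> simp [Lv]

theorem rowL_eq_cons (rp rq bs : List Char) : rowL rp rq bs = Lv rp rq :: tailRow rp rq bs := by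
  induction bs generalizing rq with
  | nil => simp [rowL, tailRow]
  | cons c rest ih => simp [rowL, tailRow, ih]

theorem rowL_ne_nil (rp rq bs : List Char) : rowL rp rq bs ≠ [] := by
  rw [rowL_eq_cons]; simp

theorem rowL_zero (rq bs : List Char) :
    rowL [] rq bs = (List.range (bs.length + 1)).map (fun k => ((rq.length + k : Nat) : Int)) := by
  induction bs generalizing rq with
  | nil => simp [rowL, Lv]
  | cons c rest ih =>
      rw [rowL, ih (c :: rq)]
      simp only [List.length_cons]
      conv_rhs => rw [List.range_succ_eq_map]
      rw [List.map_cons, List.map_map]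
      congr 1
      · simp [Lv]
      · apply List.map_congr_left; intro a _; simp [Function.comp]; ring

theorem rowL_init (b : List Char) :
    PySem.List.pyRange 0 ((b.length : Int) + 1) 1 = rowL [] [] b := by
  rw [rowL_zero, PySem.List.pyRange_one]
  have h : (((b.length : Int) + 1 - 0)).toNat = b.length + 1 := by omega
  rw [h]
  apply List.map_congr_left; intro a _; simp

theorem rowL_getLast (rp : List Char) (rq bs : List Char) :
    (rowL rp rq bs).getLast? = some (Lv rp (bs.reverse ++ rq)) := by
  induction bs generalizing rq with
  | nil => simp [rowL]
  | cons c rest ih =>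
      rw [rowL]
      have h2 := ih (c :: rq)
      cases hr : rowL rp (c :: rq) rest with
      | nil => exact absurd hr (rowL_ne_nil _ _ _)
      | cons z zs =>
          rw [hr] at h2
          rw [List.getLast?_cons_cons, h2]
          simp

theorem pyGetD_append_cons (pre : List Int) (a : Int) (l : List Int) :
    PySem.List.pyGetD (pre ++ a :: l) (pre.length : Int) 0 = a := by
  rw [PySem.List.pyGetD_natCast]
  simp [List.getD_eq_getElem?_getD]

theorem innerA_spec (c1 : Char) (rp : List Char) (bs rq : List Char) (oldPre newPre : List Int)
    (h : newPre.length = oldPre.length) :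
    levAInner c1 bs oldPre.length (oldPre ++ rowL rp rq bs) (newPre ++ [Lv (c1 :: rp) rq]) =
      (newPre ++ [Lv (c1 :: rp) rq]) ++ tailRow (c1 :: rp) rq bs := by
  induction bs generalizing rq oldPre newPre with
  | nil => simp [levAInner, tailRow]
  | cons c2 rest ihh =>
      rw [rowL, levAInner]
      have e1 : PySem.List.pyGetD (oldPre ++ Lv rp rq :: rowL rp (c2 :: rq) rest)
          ((oldPre.length : Int) + 1) 0 = Lv rp (c2 :: rq) := by
        have hl : (oldPre.length : Int) + 1 = ((oldPre ++ [Lv rp rq]).length : Int) := by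
          simp
        rw [hl, show oldPre ++ Lv rp rq :: rowL rp (c2 :: rq) rest =
          (oldPre ++ [Lv rp rq]) ++ rowL rp (c2 :: rq) rest from by simp, rowL_eq_cons]
        exact pyGetD_append_cons _ _ _
      have e2 : PySem.List.pyGetD (newPre ++ [Lv (c1 :: rp) rq]) ((oldPre.length : Int)) 0 =
          Lv (c1 :: rp) rq := by
        rw [← h]; exact pyGetD_append_cons newPre _ []
      have e3 : PySem.List.pyGetD (oldPre ++ Lv rp rq :: rowL rp (c2 :: rq) rest)
          ((oldPre.length : Int)) 0 = Lv rp rq := pyGetD_append_cons _ _ _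
      simp only [e1, e2, e3]
      have hcur : min (min (Lv rp (c2 :: rq) + 1) (Lv (c1 :: rp) rq + 1))
          (Lv rp rq + (if c1 ≠ c2 then 1 else 0)) = Lv (c1 :: rp) (c2 :: rq) := by rw [Lv]
      rw [hcur]
      have ih2 := ihh (c2 :: rq) (oldPre ++ [Lv rp rq]) (newPre ++ [Lv (c1 :: rp) rq])
        (by simp [h])
      simp only [List.length_append, List.length_cons, List.length_nil, List.append_assoc,
        List.cons_append, List.nil_append] at ih2 ⊢
      rw [show oldPre.length + 1 = oldPre.length + (0 + 1) from by omega]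
      rw [ih2]
      simp [tailRow]

theorem outerA_spec (b : List Char) (rest rp : List Char) :
    levAOuter b rest rp.length (rowL rp [] b) = rowL (rest.reverse ++ rp) [] b := by
  induction rest generalizing rp with
  | nil => simp [levAOuter]
  | cons c1 rest' ih =>
      rw [levAOuter]
      have hL : Lv (c1 :: rp) [] = (rp.length : Int) + 1 := by
        rw [Lv_nil_right]; push_cast [List.length_cons]; ring
      have hin := innerA_spec c1 rp b [] [] [] rfl
      simp only [List.nil_append, List.singleton_append, List.length_nil] at hin
      rw [hL] at hin
      rw [hin]
      rw [show ((rp.length : Int) + 1) :: tailRow (c1 :: rp) [] b = rowL (c1 :: rp) [] b from by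
        rw [rowL_eq_cons, hL]]
      have ih2 := ih (c1 :: rp)
      simp only [List.length_cons] at ih2
      rw [ih2]
      simp

theorem levA_core (a b : List Char) (h : ¬ a.length < b.length) :
    levA a b = Lv a.reverse b.reverse := by
  rw [levA, if_neg h]
  by_cases hb : b.length = 0
  · rw [if_pos hb]
    have hb' : b = [] := List.length_eq_zero_iff.mp hb
    subst hb'
    simp [Lv_nil_right]
  · rw [if_neg hb]
    rw [rowL_init]
    have h0 := outerA_spec b a []
    simp only [List.length_nil, List.append_nil] at h0
    rw [h0]
    rw [PySem.List.pyGetD_neg_one _ _ (rowL_ne_nil _ _ _)]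
    have hl := rowL_getLast a.reverse [] b
    simp only [List.append_nil] at hl
    rw [List.getLast?_eq_some_getLast (rowL_ne_nil _ _ _)] at hl
    exact Option.some.inj hl

theorem levA_eq (s1 s2 : List Char) :
    levA s1 s2 = if s1.length < s2.length then Lv s2.reverse s1.reverse else Lv s1.reverse s2.reverse := by
  by_cases h : s1.length < s2.length
  · rw [if_pos h, levA, if_pos h, levA_core s2 s1 (by omega)]
  · rw [if_neg h, levA_core s1 s2 h]

theorem bmin_le_self (x : Int) (l : List Int) : bmin x l ≤ x := by
  induction l generalizing x with
  | nil => simp [bmin]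
  | cons v l ih =>
      have h := ih (if v < x then v else x)
      simp only [bmin, List.foldl_cons] at *
      split_ifs at h ⊢ <;> omega

theorem bmin_le_mem (x : Int) (l : List Int) (y : Int) (hy : y ∈ l) : bmin x l ≤ y := by
  induction l generalizing x with
  | nil => simp at hy
  | cons v l ih =>
      simp only [bmin, List.foldl_cons]
      rcases List.mem_cons.mp hy with h | h
      · subst h
        have := bmin_le_self (if y < x then y else x) l
        simp only [bmin] at this ⊢
        by_cases hyx : y < x <;> simp [hyx] at this ⊢ <;> omega
      · exact ih (if v < x then v else x) h

theorem goB_spec (c1 : Char) (rp : List Char) (bs rq : List Char) (best : Int) :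
    altRowGo c1 bs (Lv rp rq) (Lv (c1 :: rp) rq) (tailRow rp rq bs) best =
      (tailRow (c1 :: rp) rq bs, bmin best (tailRow (c1 :: rp) rq bs)) := by
  induction bs generalizing rq best with
  | nil => simp [altRowGo, tailRow, bmin]
  | cons c2 rest ih =>
      rw [tailRow]
      simp only [altRowGo]
      rw [show min (min (Lv rp (c2 :: rq) + 1) (Lv (c1 :: rp) rq + 1))
            (Lv rp rq + (if c1 ≠ c2 then 1 else 0)) = Lv (c1 :: rp) (c2 :: rq) from by rw [Lv]]
      rw [ih (c2 :: rq)]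
      simp [tailRow, bmin]

theorem row_mono_aux (c1 : Char) (rp : List Char) (bs rq : List Char) (m : Int)
    (h : ∀ y ∈ rowL rp rq bs, m ≤ y) (h2 : m ≤ Lv (c1 :: rp) rq) :
    ∀ y ∈ rowL (c1 :: rp) rq bs, m ≤ y := by
  induction bs generalizing rq with
  | nil =>
      intro y hy; simp [rowL] at hy; omega
  | cons c2 rest ih =>
      intro y hy
      rw [rowL] at hy
      rcases List.mem_cons.mp hy with rfl | hy'
      · exact h2
      · refine ih (c2 :: rq) ?_ ?_ y hy'
        · intro z hz; exact h z (by rw [rowL]; exact List.mem_cons_of_mem _ hz)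
        · have hup : m ≤ Lv rp (c2 :: rq) := h _ (by
            rw [rowL]
            exact List.mem_cons_of_mem _ (by rw [rowL_eq_cons]; exact List.mem_cons_self))
          have hdiag : m ≤ Lv rp rq := h _ (by rw [rowL]; exact List.mem_cons_self)
          have hc : (0 : Int) ≤ if c1 ≠ c2 then 1 else 0 := by split_ifs <;> omega
          rw [Lv]
          simp only [le_min_iff]
          omega

theorem row_mono (c1 : Char) (rp b : List Char) (m : Int)
    (h : ∀ y ∈ rowL rp [] b, m ≤ y) : ∀ y ∈ rowL (c1 :: rp) [] b, m ≤ y := by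
  refine row_mono_aux c1 rp b [] m h ?_
  have h0 : m ≤ Lv rp [] := h _ (by rw [rowL_eq_cons]; exact List.mem_cons_self)
  rw [Lv_nil_right] at h0 ⊢
  simp only [List.length_cons]
  push_cast
  omega

theorem row_mono_chain (b : List Char) (rest rp : List Char) (m : Int)
    (h : ∀ y ∈ rowL rp [] b, m ≤ y) : ∀ y ∈ rowL (rest.reverse ++ rp) [] b, m ≤ y := by
  induction rest generalizing rp with
  | nil => simpa using h
  | cons c rest' ih =>
      have h1 := row_mono c rp b m h
      have h2 := ih (c :: rp) h1
      simpa [List.append_assoc] using h2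

theorem loopB_spec (b : List Char) (cap : Int) (rest rp : List Char) :
    altLoop b rest rp.length (rowL rp [] b) cap = some (rowL (rest.reverse ++ rp) [] b) ∨
    (altLoop b rest rp.length (rowL rp [] b) cap = none ∧
      ∀ y ∈ rowL (rest.reverse ++ rp) [] b, cap < y) := by
  induction rest generalizing rp with
  | nil => left; simp [altLoop]
  | cons c1 rest' ih =>
      have hL : Lv (c1 :: rp) [] = (rp.length : Int) + 1 := by
        rw [Lv_nil_right]; push_cast [List.length_cons]; ring
      rw [rowL_eq_cons]
      rw [altLoop]
      rw [← hL]
      rw [goB_spec c1 rp b [] (Lv (c1 :: rp) [])]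
      by_cases hB : bmin (Lv (c1 :: rp) []) (tailRow (c1 :: rp) [] b) > cap
      · rw [if_pos hB]
        right
        refine ⟨rfl, ?_⟩
        have hall : ∀ y ∈ rowL (c1 :: rp) [] b, bmin (Lv (c1 :: rp) []) (tailRow (c1 :: rp) [] b) ≤ y := by
          intro y hy
          rw [rowL_eq_cons] at hy
          rcases List.mem_cons.mp hy with rfl | hy'
          · exact bmin_le_self _ _
          · exact bmin_le_mem _ _ _ hy'
        have hch := row_mono_chain b rest' (c1 :: rp) _ hall
        intro y hy
        rw [show (c1 :: rest').reverse ++ rp = rest'.reverse ++ (c1 :: rp) from by simp] at hy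
        have := hch y hy
        omega
      · rw [if_neg hB]
        rw [← rowL_eq_cons]
        have ih2 := ih (c1 :: rp)
        simp only [List.length_cons] at ih2
        rw [show (c1 :: rest').reverse ++ rp = rest'.reverse ++ (c1 :: rp) from by simp]
        exact ih2

theorem distCore (a b : List Char) (cap : Int) :
    (match altLoop b a 0 (PySem.List.pyRange 0 ((b.length : Int) + 1) 1) cap with
      | none => (none : Option Int)
      | some row => if PySem.List.pyGetD row (-1) 0 ≤ cap then some (PySem.List.pyGetD row (-1) 0) else none)
      = if Lv a.reverse b.reverse ≤ cap then some (Lv a.reverse b.reverse) else none := by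
  rw [rowL_init]
  have hs := loopB_spec b cap a []
  simp only [List.length_nil, List.append_nil] at hs
  have hlast : PySem.List.pyGetD (rowL a.reverse [] b) (-1) 0 = Lv a.reverse b.reverse := by
    rw [PySem.List.pyGetD_neg_one _ _ (rowL_ne_nil _ _ _)]
    have hl := rowL_getLast a.reverse [] b
    simp only [List.append_nil] at hl
    rw [List.getLast?_eq_some_getLast (rowL_ne_nil _ _ _)] at hl
    exact Option.some.inj hl
  rcases hs with hsome | ⟨hnone, hbig⟩
  · rw [hsome]
    simp only [hlast]
  · rw [hnone]
    have hmem : Lv a.reverse b.reverse ∈ rowL a.reverse [] b := by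
      have hl := rowL_getLast a.reverse [] b
      simp only [List.append_nil] at hl
      exact List.mem_of_getLast? hl
    have := hbig _ hmem
    rw [if_neg (by omega)]

theorem distWithin_spec (s1 s2 : List Char) (cap : Int) :
    distWithin s1 s2 cap = if levA s1 s2 ≤ cap then some (levA s1 s2) else none := by
  unfold distWithin
  rw [levA_eq]
  by_cases h : s1.length < s2.length
  · simp only [if_pos h]
    exact distCore s2 s1 cap
  · simp only [if_neg h]
    exact distCore s1 s2 cap

theorem fold_rel (tl : List Char) (max_dist : Int) (items : List (String × String))
    (bd : Int) (bc bt : Option String) (hbd : bd ≤ max_dist + 1) :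
    (items.foldl (fun st p =>
        let dist := levA tl p.1.toList
        if dist ≤ max_dist ∧ dist < st.1 then (dist, (some p.2 : Option String), (some p.1 : Option String)) else st)
      (bd, bc, bt)).2 =
    (fun r => (r.2.1, r.1)) ((items.foldl (fun st p =>
        match distWithin tl p.1.toList st.2.2 with
        | some dd => ((some p.1 : Option String), (some p.2 : Option String), dd - 1)
        | none => st)
      (bt, bc, bd - 1))) := by
  induction items generalizing bd bc bt with
  | nil => simp
  | cons p rest ih =>
      simp only [List.foldl_cons]
      rw [distWithin_spec]
      by_cases hc : levA tl p.1.toList ≤ max_dist ∧ levA tl p.1.toList < bd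
      · rw [if_pos hc, if_pos (show levA tl p.1.toList ≤ bd - 1 by omega)]
        exact ih (levA tl p.1.toList) (some p.2) (some p.1) (by omega)
      · rw [if_neg hc, if_neg (show ¬ levA tl p.1.toList ≤ bd - 1 by omega)]
        exact ih bd bc bt hbd

-- ===== VERDICT (by name: the statement is the Claim_ definition above) =====
theorem fuzzy_title_match_spec : Claim_equal_fuzzy_title_match := by
  intro title tc md _
  unfold Spec_fuzzy_title_match fuzzy_title_match fuzzy_title_match_alt
  cases hg : (PySem.Dict.ofList tc).get? (PySem.Str.lower (PySem.Str.strip title)) with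
  | some c =>
      have hco : (PySem.Dict.ofList tc).contains (PySem.Str.lower (PySem.Str.strip title)) = true := by
        rw [PySem.Dict.contains_eq_isSome_get?, hg]; rfl
      simp [hg, hco]
  | none =>
      have hco : (PySem.Dict.ofList tc).contains (PySem.Str.lower (PySem.Str.strip title)) = false := by
        rw [PySem.Dict.contains_eq_isSome_get?, hg]; rfl
      simp only [hg, hco, Bool.false_eq_true, if_false]
      have hfr := fold_rel (PySem.Str.lower (PySem.Str.strip title)).toList md
        (PySem.Dict.ofList tc).items (md + 1) none none (le_refl _)
      simp only [show md + 1 - 1 = md from by ring] at hfr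
      have h1 := congrArg Prod.fst hfr
      have h2 := congrArg Prod.snd hfr
      simp only at h1 h2
      rw [h1, h2]
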